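-- pv_equiv track=rewrite | github.com/p6rdcn/ECOPY_23241 | src/weekly/weekly_test_1.py | sort_list_by_divisibility
-- ===== SOURCE A (Python) =====
-- def sort_list_by_divisibility(input_list):
--     new_dict = {}
--     by_two = []
--     by_five = []
--     by_two_and_five = []
--     by_none = []
--
--     for i in input_list:
--         if i % 2 == 0:
--             if i % 5 == 0:
--                 by_two_and_five.append(i)
--             else:
--                 by_two.append(i)
--         elif i % 5 == 0:
--             by_five.append(i)
--         else:
--             by_none.append(i)
--
--     new_dict["by_two"] = by_two
--     new_dict["by_five"] = by_five
--     new_dict["by_two_and_five"] = by_two_and_five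
--     new_dict["by_none"] = by_none
--     return new_dict
-- ===== SOURCE B (Python) =====
-- def sort_list_by_divisibility(input_list):
--     return {
--         "by_two": [i for i in input_list if i % 2 == 0 and i % 5 != 0],
--         "by_five": [i for i in input_list if i % 2 != 0 and i % 5 == 0],
--         "by_two_and_five": [i for i in input_list if i % 2 == 0 and i % 5 == 0],
--         "by_none": [i for i in input_list if i % 2 != 0 and i % 5 != 0],
--     }
-- ===== Notes on version B (the rewrite author's own statement) =====
-- stated objective: idiomatic
-- what changed: Replaced the single categorizing loop with mutually-exclusive branches by four independent filtering passes (list comprehensions), one per bucket, assembled directly into the dict literal.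
import Mathlib
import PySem

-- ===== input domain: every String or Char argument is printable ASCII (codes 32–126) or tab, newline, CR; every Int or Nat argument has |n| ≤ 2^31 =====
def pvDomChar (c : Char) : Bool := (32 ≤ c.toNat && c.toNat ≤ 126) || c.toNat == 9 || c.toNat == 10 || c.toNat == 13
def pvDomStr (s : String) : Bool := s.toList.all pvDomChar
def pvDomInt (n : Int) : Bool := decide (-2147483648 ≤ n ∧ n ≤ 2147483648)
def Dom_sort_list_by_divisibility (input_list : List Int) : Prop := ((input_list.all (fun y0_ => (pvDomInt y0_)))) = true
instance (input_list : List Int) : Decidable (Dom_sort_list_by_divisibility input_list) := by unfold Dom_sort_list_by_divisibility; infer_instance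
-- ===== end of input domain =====

-- ===== PORT A =====
def sort_list_by_divisibility (input_list : List Int) : List (String × List Int) :=
  let st := input_list.foldl
    (fun (acc : List Int × List Int × List Int × List Int) i =>
      let (two, five, both, none_) := acc
      if i % 2 = 0 then
        if i % 5 = 0 then (two, five, both ++ [i], none_)
        else (two ++ [i], five, both, none_)
      else if i % 5 = 0 then (two, five ++ [i], both, none_)
      else (two, five, both, none_ ++ [i]))
    ([], [], [], [])
  let (two, five, both, none_) := st
  [("by_two", two), ("by_five", five), ("by_two_and_five", both), ("by_none", none_)]

-- ===== PORT B =====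
-- B: four independent filter passes (one per bucket) instead of one exclusive-branch loop; same return value.
def sort_list_by_divisibility_alt (input_list : List Int) : List (String × List Int) :=
  [("by_two", input_list.filter (fun i => i % 2 = 0 ∧ i % 5 ≠ 0)),
   ("by_five", input_list.filter (fun i => i % 2 ≠ 0 ∧ i % 5 = 0)),
   ("by_two_and_five", input_list.filter (fun i => i % 2 = 0 ∧ i % 5 = 0)),
   ("by_none", input_list.filter (fun i => i % 2 ≠ 0 ∧ i % 5 ≠ 0))]

-- ===== PRECONDITION & SPEC =====
def Spec_sort_list_by_divisibility (input_list : List Int) (out : List (String × List Int)) : Prop := out = sort_list_by_divisibility_alt input_list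
instance (input_list : List Int) (out : List (String × List Int)) : Decidable (Spec_sort_list_by_divisibility input_list out) := by unfold Spec_sort_list_by_divisibility; infer_instance

-- ===== CLAIM (what is proved, stated in full; the proofs are below) =====
def Claim_equal_sort_list_by_divisibility : Prop := ∀ (input_list : List Int), Dom_sort_list_by_divisibility input_list → Spec_sort_list_by_divisibility input_list (sort_list_by_divisibility input_list)

-- ===== LEMMAS AND PROOFS =====
-- Loop invariant: the fold's four accumulators are the initial values extended by the four filters.
theorem fold_inv (xs : List Int) (t f b n : List Int) :
    xs.foldl
      (fun (acc : List Int × List Int × List Int × List Int) i =>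
        let (two, five, both, none_) := acc
        if i % 2 = 0 then
          if i % 5 = 0 then (two, five, both ++ [i], none_)
          else (two ++ [i], five, both, none_)
        else if i % 5 = 0 then (two, five ++ [i], both, none_)
        else (two, five, both, none_ ++ [i]))
      (t, f, b, n)
    = (t ++ xs.filter (fun i => i % 2 = 0 ∧ i % 5 ≠ 0),
       f ++ xs.filter (fun i => i % 2 ≠ 0 ∧ i % 5 = 0),
       b ++ xs.filter (fun i => i % 2 = 0 ∧ i % 5 = 0),
       n ++ xs.filter (fun i => i % 2 ≠ 0 ∧ i % 5 ≠ 0)) := by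
  induction xs generalizing t f b n with
  | nil => simp
  | cons x xs ih =>
    simp only [List.foldl_cons, List.filter_cons]
    by_cases h2 : x % 2 = 0 <;> by_cases h5 : x % 5 = 0
    · rw [if_pos h2, if_pos h5, ih]; simp [h2, h5]
    · rw [if_pos h2, if_neg h5, ih]; simp [h2, h5]
    · rw [if_neg h2, if_pos h5, ih]; simp [h2, h5]
    · rw [if_neg h2, if_neg h5, ih]; simp [h2, h5]

-- ===== VERDICT (by name: the statement is the Claim_ definition above) =====
theorem sort_list_by_divisibility_spec : Claim_equal_sort_list_by_divisibility := by
  intro input_list _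
  unfold Spec_sort_list_by_divisibility sort_list_by_divisibility sort_list_by_divisibility_alt
  dsimp only
  rw [fold_inv input_list [] [] [] []]
  simp
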